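-- pv_equiv track=rewrite | github.com/F-Marchal/SnpHeatMap | scripts/getopts_parser/getopts_parser.py | getopts_digester_check_item_endings
-- ===== SOURCE A (Python) =====
-- def getopts_digester_check_item_endings(list_of_values: list[str], last_char: str = ":",) -> bool or None:
--     """!
--     @brief Check if the last char of each string in @p list_of_values is equal to last_char.
--     if some od themes are equals and others are not, an error is raised.
--
--     @param list_of_values : list[str] => A list of string
--     @param last_char : str = ":" => A character
--
--     @return bool or None =>
--     - True : All items in @p list_of_values end by @p last_char
--     - False : No item in @p list_of_values end by @p last_char
--     - None : @p list_of_values is empty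
--     - ValueError :  Some value(s) end by @p last_char but other(s) do(es) not."
--     """
--
--     have_value = None
--
--     for i, values in enumerate(list_of_values):
--         # Do the first item end by @p last_char ?
--         if have_value is None:
--             have_value = values[-1] == last_char
--
--         # Test if this item end by the same symbol as the first one
--         elif have_value is True and values[-1] == last_char:
--             pass
--
--         elif have_value is False and values[-1] != last_char:
--             pass
--
--         else:
--             raise ValueError(f"Conflict found. Some value(s) end by '{last_char}' but other(s) do(es) not.")
--
--     return have_value
-- ===== SOURCE B (Python) =====
-- def getopts_digester_check_item_endings(list_of_values: list[str], last_char: str = ":",) -> bool or None: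
--     """Count how many strings end with last_char; all/none decides the answer."""
--     if not list_of_values:
--         return None
--     hits = sum(v[-1] == last_char for v in list_of_values)
--     if hits == 0:
--         return False
--     if hits == len(list_of_values):
--         return True
--     raise ValueError(f"Conflict found. Some value(s) end by '{last_char}' but other(s) do(es) not.")
-- ===== Notes on version B (the rewrite author's own statement) =====
-- stated objective: alternative
-- what changed: B replaces A's stateful consistency scan (tri-state sentinel updated and checked per element) with a counting pass that sums how many strings end with last_char and then decides the answer arithmetically (0 -> False, len -> True, otherwise ValueError).
import Mathlib
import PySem

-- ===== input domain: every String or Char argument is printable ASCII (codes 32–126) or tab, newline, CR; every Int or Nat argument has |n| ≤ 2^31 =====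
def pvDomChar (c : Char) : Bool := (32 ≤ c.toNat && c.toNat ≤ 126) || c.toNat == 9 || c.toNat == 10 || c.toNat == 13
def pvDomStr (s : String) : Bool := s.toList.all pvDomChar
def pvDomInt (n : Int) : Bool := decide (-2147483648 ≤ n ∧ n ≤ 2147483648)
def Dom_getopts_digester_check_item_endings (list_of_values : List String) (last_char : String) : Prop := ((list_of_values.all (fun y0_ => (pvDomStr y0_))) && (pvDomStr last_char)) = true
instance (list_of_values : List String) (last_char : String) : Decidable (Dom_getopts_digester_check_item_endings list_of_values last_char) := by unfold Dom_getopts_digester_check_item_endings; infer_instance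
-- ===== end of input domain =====

-- B replaces A's stateful per-element consistency scan by a counting pass plus an arithmetic
-- all/none decision (objective: alternative; return-value equivalence on Pre_).

-- ===== PORT A =====
-- raise (ValueError/IndexError) is modelled as `none`; Pre_ excludes all raising inputs
def pvGoA (last_char : String) (hv : Option Bool) : List String → Option Bool
  | [] => hv
  | v :: rest =>
    match PySem.Str.pyGet? v (-1) with
    | none => none            -- IndexError on v[-1] (excluded by Pre_)
    | some c =>
      match hv with
      | none => pvGoA last_char (some (String.ofList [c] == last_char)) rest
      | some true => if String.ofList [c] == last_char then pvGoA last_char (some true) rest else none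
      | some false => if String.ofList [c] != last_char then pvGoA last_char (some false) rest else none

def getopts_digester_check_item_endings (list_of_values : List String) (last_char : String) : Option Bool :=
  pvGoA last_char none list_of_values

-- ===== PORT B =====
-- left-to-right sum of the generator `v[-1] == last_char`; IndexError (= none) at the first empty string
def pvSumB (last_char : String) (acc : Nat) : List String → Option Nat
  | [] => some acc
  | v :: rest =>
    match PySem.Str.pyGet? v (-1) with
    | none => none            -- IndexError (excluded by Pre_)
    | some c => pvSumB last_char (acc + (if String.ofList [c] == last_char then 1 else 0)) rest

def getopts_digester_check_item_endings_alt (list_of_values : List String) (last_char : String) : Option Bool :=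
  match list_of_values with
  | [] => none
  | _ :: _ =>
    match pvSumB last_char 0 list_of_values with
    | none => none
    | some hits =>
      if hits = 0 then some false
      else if hits = list_of_values.length then some true
      else none               -- ValueError (excluded by Pre_)

-- ===== PRECONDITION & SPEC =====
def pvEnds (s : String) (last_char : String) : Bool :=
  match PySem.Str.pyGet? s (-1) with
  | some c => String.ofList [c] == last_char
  | none => false

-- Pre_ excludes exactly the raising inputs: a list containing an empty string (IndexError on s[-1])
-- or with mixed endings (ValueError); A returns normally everywhere else.
def Pre_getopts_digester_check_item_endings (list_of_values : List String) (last_char : String) : Prop :=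
  (∀ s ∈ list_of_values, s ≠ "") ∧
  ((∀ s ∈ list_of_values, pvEnds s last_char = true) ∨ (∀ s ∈ list_of_values, pvEnds s last_char = false))
instance (list_of_values : List String) (last_char : String) : Decidable (Pre_getopts_digester_check_item_endings list_of_values last_char) := by unfold Pre_getopts_digester_check_item_endings; infer_instance

def pvWitness_getopts_digester_check_item_endings : List String × String := (["a:", "b:"], ":")

def Spec_getopts_digester_check_item_endings (list_of_values : List String) (last_char : String) (out : Option Bool) : Prop := out = getopts_digester_check_item_endings_alt list_of_values last_char
instance (list_of_values : List String) (last_char : String) (out : Option Bool) : Decidable (Spec_getopts_digester_check_item_endings list_of_values last_char out) := by unfold Spec_getopts_digester_check_item_endings; infer_instance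

-- ===== CLAIM (what is proved, stated in full; the proofs are below) =====
def Claim_equal_getopts_digester_check_item_endings : Prop := ∀ (list_of_values : List String) (last_char : String), Dom_getopts_digester_check_item_endings list_of_values last_char → Pre_getopts_digester_check_item_endings list_of_values last_char → Spec_getopts_digester_check_item_endings list_of_values last_char (getopts_digester_check_item_endings list_of_values last_char)

-- ===== LEMMAS AND PROOFS =====

theorem pyGet_str_neg_one (s : String) : PySem.Str.pyGet? s (-1) = s.toList.getLast? := by
  simp [PySem.List.pyGet?_neg_one]

theorem pyGet_ne_empty {s : String} (h : s ≠ "") : ∃ c, PySem.Str.pyGet? s (-1) = some c := by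
  have hl : s.toList ≠ [] := by simpa using h
  rw [pyGet_str_neg_one]
  cases hg : s.toList.getLast? with
  | some c => exact ⟨c, rfl⟩
  | none => exact absurd (List.getLast?_eq_none_iff.mp hg) hl

theorem pvEnds_some {c : Char} {s last_char : String}
    (hg : PySem.Str.pyGet? s (-1) = some c) :
    (String.ofList [c] == last_char) = pvEnds s last_char := by
  simp only [pvEnds]; rw [hg]

theorem pvGoA_const (last_char : String) (b : Bool) (l : List String)
    (hne : ∀ s ∈ l, s ≠ "") (h : ∀ s ∈ l, pvEnds s last_char = b) :
    pvGoA last_char (some b) l = some b := by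
  induction l with
  | nil => rfl
  | cons v rest ih =>
    obtain ⟨c, hc⟩ := pyGet_ne_empty (hne v (by simp))
    have he : (String.ofList [c] == last_char) = b := by
      rw [pvEnds_some hc]; exact h v (by simp)
    cases b <;>
      simp_all [pvGoA, fun s hs => hne s (List.mem_cons_of_mem _ hs),
        fun s hs => h s (List.mem_cons_of_mem _ hs)]

theorem pvSumB_const (last_char : String) (b : Bool) (l : List String) (acc : Nat)
    (hne : ∀ s ∈ l, s ≠ "") (h : ∀ s ∈ l, pvEnds s last_char = b) :
    pvSumB last_char acc l = some (acc + (if b then l.length else 0)) := by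
  induction l generalizing acc with
  | nil => simp [pvSumB]
  | cons v rest ih =>
    obtain ⟨c, hc⟩ := pyGet_ne_empty (hne v (by simp))
    have he : (String.ofList [c] == last_char) = b := by
      rw [pvEnds_some hc]; exact h v (by simp)
    have := ih (acc + (if b then 1 else 0))
      (fun s hs => hne s (List.mem_cons_of_mem _ hs))
      (fun s hs => h s (List.mem_cons_of_mem _ hs))
    cases b <;> simp_all [pvSumB] <;> omega

theorem alt_const (last_char : String) (b : Bool) (v : String) (rest : List String)
    (hne : ∀ s ∈ v :: rest, s ≠ "") (hall : ∀ s ∈ v :: rest, pvEnds s last_char = b) :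
    getopts_digester_check_item_endings_alt (v :: rest) last_char = some b := by
  have hs := pvSumB_const last_char b (v :: rest) 0 hne hall
  cases b <;>
    simp [getopts_digester_check_item_endings_alt, hs]

theorem main_cons (lc : String) (b : Bool) (v : String) (rest : List String)
    (hne : ∀ s ∈ v :: rest, s ≠ "") (hall : ∀ s ∈ v :: rest, pvEnds s lc = b) :
    getopts_digester_check_item_endings (v :: rest) lc
      = getopts_digester_check_item_endings_alt (v :: rest) lc := by
  obtain ⟨c, hc⟩ := pyGet_ne_empty (hne v (by simp))
  have he : (String.ofList [c] == lc) = b := by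
    rw [pvEnds_some hc]; exact hall v (by simp)
  have hA := pvGoA_const lc b rest (fun s hs => hne s (List.mem_cons_of_mem _ hs))
    (fun s hs => hall s (List.mem_cons_of_mem _ hs))
  have hB := alt_const lc b v rest hne hall
  have hc' : PySem.List.pyGet? v.toList (-1) = some c := by simpa using hc
  rw [hB]
  cases b <;>
    simp [getopts_digester_check_item_endings, pvGoA, hc', he, hA]

-- ===== VERDICT (by name: the statement is the Claim_ definition above) =====
theorem getopts_digester_check_item_endings_spec : Claim_equal_getopts_digester_check_item_endings := by
  intro l lc _ hpre
  unfold Spec_getopts_digester_check_item_endings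
  obtain ⟨hne, hhom⟩ := hpre
  cases l with
  | nil => rfl
  | cons v rest =>
    rcases hhom with hall | hall
    · exact main_cons lc true v rest hne hall
    · exact main_cons lc false v rest hne hall
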